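-- pv_equiv track=rewrite | github.com/zuek1598/etf_lates | analyzers/quality_ranker.py | _get_etf_sectors
-- ===== SOURCE A (Python) =====
-- from typing import Dict, List, Tuple, Optional
--
-- def _get_etf_sectors(etf_list: List[str]) -> Dict[str, str]:
--     """Get sector classification for ETFs"""
--
--     sectors = {}
--
--     # Simple sector mapping based on ETF patterns
--     for etf in etf_list:
--         if 'GOLD' in etf or 'MNRS' in etf:
--             sectors[etf] = 'gold'
--         elif 'TECH' in etf or 'HNDQ' in etf or 'ATEC' in etf:
--             sectors[etf] = 'technology'
--         elif 'BOND' in etf or 'VAP' in etf or 'AAA' in etf: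
--             sectors[etf] = 'fixed_income'
--         elif 'CRYP' in etf or 'BTC' in etf:
--             sectors[etf] = 'crypto'
--         elif 'GEAR' in etf or 'BBOZ' in etf:
--             sectors[etf] = 'leveraged'
--         else:
--             sectors[etf] = 'diversified'
--
--     return sectors
-- ===== SOURCE B (Python) =====
-- from typing import Dict, List
--
-- RULES = [
--     ('gold', ['GOLD', 'MNRS']),
--     ('technology', ['TECH', 'HNDQ', 'ATEC']),
--     ('fixed_income', ['BOND', 'VAP', 'AAA']),
--     ('crypto', ['CRYP', 'BTC']),
--     ('leveraged', ['GEAR', 'BBOZ']),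
-- ]
--
-- def _get_etf_sectors(etf_list: List[str]) -> Dict[str, str]:
--     """Get sector classification for ETFs"""
--     # Staged sieve: one pass over the pool per sector; each pass extracts the
--     # tickers matching that sector's patterns and shrinks the pool, so every
--     # ticker is labelled by the first sector whose pass catches it.
--     mapping = {}
--     remaining = list(etf_list)
--     for sector, pats in RULES:
--         matched = [e for e in remaining if any(p in e for p in pats)]
--         remaining = [e for e in remaining if not any(p in e for p in pats)]
--         for e in matched:
--             mapping[e] = sector
--     for e in remaining:
--         mapping[e] = 'diversified'
--     return {etf: mapping[etf] for etf in etf_list}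
-- ===== Notes on version B (the rewrite author's own statement) =====
-- stated objective: alternative
-- what changed: Instead of classifying each ticker by an elif cascade, B runs one sieve pass per sector over a shrinking pool (extracting that sector's matches and removing them), then rebuilds the dict in the original order from the accumulated mapping.
import Mathlib
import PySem

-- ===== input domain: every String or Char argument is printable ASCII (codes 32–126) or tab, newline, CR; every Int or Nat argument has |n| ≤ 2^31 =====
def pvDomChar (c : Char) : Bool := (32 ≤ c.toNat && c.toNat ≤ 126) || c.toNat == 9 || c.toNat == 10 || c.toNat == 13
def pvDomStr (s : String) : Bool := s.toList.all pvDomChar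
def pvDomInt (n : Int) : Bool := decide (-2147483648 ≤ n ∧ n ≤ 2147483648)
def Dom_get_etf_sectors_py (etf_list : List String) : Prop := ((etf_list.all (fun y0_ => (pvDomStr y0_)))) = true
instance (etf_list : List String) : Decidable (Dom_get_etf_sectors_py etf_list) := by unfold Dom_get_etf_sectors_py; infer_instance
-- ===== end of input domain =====

-- B replaces the per-ticker elif cascade with a staged sieve: one pass per sector over a shrinking pool (alternative decomposition; same cost).

-- ===== PORT A =====
def get_etf_sectors_py (etf_list : List String) : List (String × String) :=
  (etf_list.foldl (fun (sectors : PySem.Dict String String) etf =>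
    if PySem.Str.isIn "GOLD" etf || PySem.Str.isIn "MNRS" etf then
      sectors.insert etf "gold"
    else if PySem.Str.isIn "TECH" etf || (PySem.Str.isIn "HNDQ" etf || PySem.Str.isIn "ATEC" etf) then
      sectors.insert etf "technology"
    else if PySem.Str.isIn "BOND" etf || (PySem.Str.isIn "VAP" etf || PySem.Str.isIn "AAA" etf) then
      sectors.insert etf "fixed_income"
    else if PySem.Str.isIn "CRYP" etf || PySem.Str.isIn "BTC" etf then
      sectors.insert etf "crypto"
    else if PySem.Str.isIn "GEAR" etf || PySem.Str.isIn "BBOZ" etf then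
      sectors.insert etf "leveraged"
    else
      sectors.insert etf "diversified") PySem.Dict.empty).items

-- ===== PORT B =====
def pvRules : List (String × List String) :=
  [("gold", ["GOLD", "MNRS"]),
   ("technology", ["TECH", "HNDQ", "ATEC"]),
   ("fixed_income", ["BOND", "VAP", "AAA"]),
   ("crypto", ["CRYP", "BTC"]),
   ("leveraged", ["GEAR", "BBOZ"])]

-- one sieve pass: extract this sector's matches from the pool, shrink the pool
def pvSieveStep (st : PySem.Dict String String × List String) (rule : String × List String) :
    PySem.Dict String String × List String :=
  let matched := st.2.filter (fun e => rule.2.any (fun p => PySem.Str.isIn p e))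
  let remaining := st.2.filter (fun e => !rule.2.any (fun p => PySem.Str.isIn p e))
  (matched.foldl (fun m e => m.insert e rule.1) st.1, remaining)

def get_etf_sectors_py_alt (etf_list : List String) : List (String × String) :=
  let st := pvRules.foldl pvSieveStep (PySem.Dict.empty, etf_list)
  let mapping := st.2.foldl (fun m e => m.insert e "diversified") st.1
  (etf_list.foldl (fun (d : PySem.Dict String String) etf =>
      d.insert etf (match mapping.get? etf with | some v => v | none => "")) PySem.Dict.empty).items

-- ===== PRECONDITION & SPEC =====
def Spec_get_etf_sectors_py (etf_list : List String) (out : List (String × String)) : Prop := out = get_etf_sectors_py_alt etf_list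
instance (etf_list : List String) (out : List (String × String)) : Decidable (Spec_get_etf_sectors_py etf_list out) := by unfold Spec_get_etf_sectors_py; infer_instance

-- ===== CLAIM (what is proved, stated in full; the proofs are below) =====
def Claim_equal_get_etf_sectors_py : Prop := ∀ (etf_list : List String), Dom_get_etf_sectors_py etf_list → Spec_get_etf_sectors_py etf_list (get_etf_sectors_py etf_list)

-- ===== LEMMAS AND PROOFS =====

-- first sector (in rule order) whose patterns match e
def pvFirstMatch (rs : List (String × List String)) (e : String) : Option String :=
  (rs.find? (fun r => r.2.any (fun p => PySem.Str.isIn p e))).map (·.1)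

theorem pv_get_foldl_insert_not_mem (l : List String) (m : PySem.Dict String String)
    (s e : String) (h : e ∉ l) :
    (l.foldl (fun m x => m.insert x s) m).get? e = m.get? e := by
  induction l generalizing m with
  | nil => rfl
  | cons x t ih =>
    simp only [List.mem_cons, not_or] at h
    simp only [List.foldl_cons]
    rw [ih _ h.2, PySem.Dict.get?_insert_of_ne m s h.1]

theorem pv_get_foldl_insert_mem (l : List String) (m : PySem.Dict String String)
    (s e : String) (h : e ∈ l) :
    (l.foldl (fun m x => m.insert x s) m).get? e = some s := by
  induction l generalizing m with
  | nil => cases h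
  | cons x t ih =>
    simp only [List.foldl_cons]
    by_cases ht : e ∈ t
    · exact ih _ ht
    · have hx : e = x := by rcases List.mem_cons.1 h with h' | h'; exact h'; exact absurd h' ht
      rw [pv_get_foldl_insert_not_mem t _ s e ht, hx, PySem.Dict.get?_insert_self]

-- a ticker not in the pool is untouched by the remaining sieve passes
theorem pv_sieve_not_mem (rs : List (String × List String))
    (m : PySem.Dict String String) (rem : List String) (e : String) (h : e ∉ rem) :
    (rs.foldl pvSieveStep (m, rem)).1.get? e = m.get? e ∧ e ∉ (rs.foldl pvSieveStep (m, rem)).2 := by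
  induction rs generalizing m rem with
  | nil => exact ⟨rfl, h⟩
  | cons r rs ih =>
    simp only [List.foldl_cons, pvSieveStep]
    have hm : e ∉ rem.filter (fun e => r.2.any (fun p => PySem.Str.isIn p e)) :=
      fun hc => h (List.mem_of_mem_filter hc)
    have hr : e ∉ rem.filter (fun e => !r.2.any (fun p => PySem.Str.isIn p e)) :=
      fun hc => h (List.mem_of_mem_filter hc)
    have := ih (((rem.filter (fun e => r.2.any (fun p => PySem.Str.isIn p e))).foldl
        (fun m e => m.insert e r.1) m)) _ hr
    rw [this.1, pv_get_foldl_insert_not_mem _ _ _ _ hm]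
    exact ⟨rfl, this.2⟩

-- a ticker in the pool ends with the first matching sector, or stays in the pool untouched
theorem pv_sieve_mem (rs : List (String × List String))
    (m : PySem.Dict String String) (rem : List String) (e : String) (h : e ∈ rem) :
    (match pvFirstMatch rs e with
     | some s => (rs.foldl pvSieveStep (m, rem)).1.get? e = some s ∧ e ∉ (rs.foldl pvSieveStep (m, rem)).2
     | none => (rs.foldl pvSieveStep (m, rem)).1.get? e = m.get? e ∧ e ∈ (rs.foldl pvSieveStep (m, rem)).2) := by
  induction rs generalizing m rem with
  | nil => exact ⟨rfl, h⟩
  | cons r rs ih =>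
    by_cases hb : (r.2.any (fun p => PySem.Str.isIn p e)) = true
    · have hfm : pvFirstMatch (r :: rs) e = some r.1 := by
        unfold pvFirstMatch
        simp only [List.find?_cons, hb]; rfl
      rw [hfm]
      simp only [List.foldl_cons, pvSieveStep]
      have hmem : e ∈ rem.filter (fun e => r.2.any (fun p => PySem.Str.isIn p e)) :=
        List.mem_filter.2 ⟨h, hb⟩
      have hnot : e ∉ rem.filter (fun e => !r.2.any (fun p => PySem.Str.isIn p e)) := by
        intro hc
        have := (List.mem_filter.1 hc).2
        rw [hb] at this
        exact Bool.false_ne_true this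
      have := pv_sieve_not_mem rs
        ((rem.filter (fun e => r.2.any (fun p => PySem.Str.isIn p e))).foldl
          (fun m e => m.insert e r.1) m)
        (rem.filter (fun e => !r.2.any (fun p => PySem.Str.isIn p e))) e hnot
      rw [this.1, pv_get_foldl_insert_mem _ _ _ _ hmem]
      exact ⟨rfl, this.2⟩
    · have hfm : pvFirstMatch (r :: rs) e = pvFirstMatch rs e := by
        unfold pvFirstMatch
        simp only [List.find?_cons, Bool.eq_false_iff.2 hb]
      rw [hfm]
      simp only [List.foldl_cons, pvSieveStep]
      have hmem : e ∈ rem.filter (fun e => !r.2.any (fun p => PySem.Str.isIn p e)) := by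
        refine List.mem_filter.2 ⟨h, ?_⟩
        rw [Bool.eq_false_iff.2 hb]; rfl
      have hnot : e ∉ rem.filter (fun e => r.2.any (fun p => PySem.Str.isIn p e)) := by
        intro hc; exact hb (List.mem_filter.1 hc).2
      have := ih (((rem.filter (fun e => r.2.any (fun p => PySem.Str.isIn p e))).foldl
          (fun m x => m.insert x r.1) m)) _ hmem
      cases hc : pvFirstMatch rs e with
      | some s => rw [hc] at this; exact this
      | none =>
        rw [hc] at this
        rw [this.1, pv_get_foldl_insert_not_mem _ _ _ _ hnot]
        exact ⟨rfl, this.2⟩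

-- B's lookup value for a listed ticker
theorem pv_mapping_get (etf_list : List String) (e : String) (h : e ∈ etf_list) :
    (let st := pvRules.foldl pvSieveStep (PySem.Dict.empty, etf_list)
     (st.2.foldl (fun m e => m.insert e "diversified") st.1).get? e)
    = some (match pvFirstMatch pvRules e with | some s => s | none => "diversified") := by
  have := pv_sieve_mem pvRules PySem.Dict.empty etf_list e h
  cases hc : pvFirstMatch pvRules e with
  | some s =>
    rw [hc] at this
    simp only
    rw [pv_get_foldl_insert_not_mem _ _ _ _ this.2, this.1]
  | none =>
    rw [hc] at this
    simp only
    rw [pv_get_foldl_insert_mem _ _ _ _ this.2]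

-- A's cascade picks exactly the first matching sector
theorem pv_cascade_eq_firstMatch (etf : String) (d : PySem.Dict String String) :
    (if PySem.Str.isIn "GOLD" etf || PySem.Str.isIn "MNRS" etf then
      d.insert etf "gold"
    else if PySem.Str.isIn "TECH" etf || (PySem.Str.isIn "HNDQ" etf || PySem.Str.isIn "ATEC" etf) then
      d.insert etf "technology"
    else if PySem.Str.isIn "BOND" etf || (PySem.Str.isIn "VAP" etf || PySem.Str.isIn "AAA" etf) then
      d.insert etf "fixed_income"
    else if PySem.Str.isIn "CRYP" etf || PySem.Str.isIn "BTC" etf then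
      d.insert etf "crypto"
    else if PySem.Str.isIn "GEAR" etf || PySem.Str.isIn "BBOZ" etf then
      d.insert etf "leveraged"
    else
      d.insert etf "diversified")
    = d.insert etf (match pvFirstMatch pvRules etf with | some s => s | none => "diversified") := by
  cases h1 : (PySem.Str.isIn "GOLD" etf || PySem.Str.isIn "MNRS" etf) <;>
  cases h2 : (PySem.Str.isIn "TECH" etf || (PySem.Str.isIn "HNDQ" etf || PySem.Str.isIn "ATEC" etf)) <;>
  cases h3 : (PySem.Str.isIn "BOND" etf || (PySem.Str.isIn "VAP" etf || PySem.Str.isIn "AAA" etf)) <;>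
  cases h4 : (PySem.Str.isIn "CRYP" etf || PySem.Str.isIn "BTC" etf) <;>
  cases h5 : (PySem.Str.isIn "GEAR" etf || PySem.Str.isIn "BBOZ" etf) <;>
    simp only [pvFirstMatch, pvRules, List.find?_cons, List.any_cons, List.any_nil,
      Bool.or_false, h1, h2, h3, h4, h5, if_true] <;>
    rfl

theorem get_etf_sectors_py_eq_alt (etf_list : List String) :
    get_etf_sectors_py etf_list = get_etf_sectors_py_alt etf_list := by
  unfold get_etf_sectors_py get_etf_sectors_py_alt
  simp only
  congr 1
  apply PySem.List.foldl_congr_mem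
  intro acc x hx
  rw [pv_cascade_eq_firstMatch]
  congr 1
  have := pv_mapping_get etf_list x hx
  simp only at this
  rw [this]

-- ===== VERDICT (by name: the statement is the Claim_ definition above) =====
theorem get_etf_sectors_py_spec : Claim_equal_get_etf_sectors_py := by
  intro etf_list _
  exact get_etf_sectors_py_eq_alt etf_list
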